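-- pv_equiv track=rewrite | github.com/COV2104/Homework_Python | Homework_5/Task_104.py | selection_coefficients
-- ===== SOURCE A (Python) =====
-- def selection_coefficients(string):
--     s = string
--     l = len(s)
--     numbers = []
--     i = 0
--     while i < l:
--         s_int = ''
--         a = s[i]
--         while '0' <= a <= '9':
--             s_int += a
--             i += 1
--             if i < l:
--                 a = s[i]
--             else:
--                 break
--         i += 1
--         if s_int != '':
--             numbers.append(int(s_int))
--     coefficient = []
--     for i in range(len(numbers)-2):
--         if i % 2 == 0:
--             coefficient.append(numbers[i])
--     coefficient.append(numbers[-2])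
--     return coefficient
-- ===== SOURCE B (Python) =====
-- def selection_coefficients(string):
--     # Staged pipeline instead of A's cursor-driven nested while-scan:
--     # 1) blank out every non-digit character, 2) tokenize with str.split(),
--     # 3) evaluate each token by a Horner fold, 4) select even indices below
--     # len-2 by slicing and append numbers[-2].
--     blanked = ''.join(c if '0' <= c <= '9' else ' ' for c in string)
--     numbers = []
--     for w in blanked.split():
--         v = 0
--         for c in w:
--             v = 10 * v + ord(c) - 48
--         numbers.append(v)
--     return numbers[:-2:2] + [numbers[-2]]
-- ===== Notes on version B (the rewrite author's own statement) =====
-- stated objective: alternative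
-- what changed: Replaces A's single cursor-driven scan (nested while-loops over an index, building digit substrings and re-parsing them with int()) by a staged pipeline: blank out non-digits, tokenize with str.split(), evaluate tokens by a Horner fold, and replace A's even-index loop over range(len-2) by the slice numbers[:-2:2]; Pre_ excludes strings containing fewer than two digit runs, on which both A and B raise IndexError at numbers[-2].
import Mathlib
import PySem

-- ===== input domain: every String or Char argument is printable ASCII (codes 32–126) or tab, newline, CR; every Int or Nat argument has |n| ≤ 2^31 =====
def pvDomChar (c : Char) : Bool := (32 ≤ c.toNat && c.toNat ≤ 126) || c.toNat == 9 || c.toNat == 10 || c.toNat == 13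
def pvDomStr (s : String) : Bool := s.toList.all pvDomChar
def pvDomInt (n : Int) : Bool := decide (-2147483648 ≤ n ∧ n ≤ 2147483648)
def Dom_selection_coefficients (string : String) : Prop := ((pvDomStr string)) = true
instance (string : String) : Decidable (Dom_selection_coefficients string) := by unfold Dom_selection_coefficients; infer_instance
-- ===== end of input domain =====

-- B replaces A's cursor-driven nested while-scan by a staged pipeline (blank out
-- non-digits, str.split(), Horner fold per token) and A's even-index loop by the
-- slice numbers[:-2:2]; equal output wherever A returns.

-- ===== PORT A =====
-- '0' <= a <= '9' (chained comparison, both programs)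
def pvIsDig (c : Char) : Bool := '0' ≤ c && c ≤ '9'

-- int(s_int): s_int is a nonempty all-digit string, where int() is exactly this base-10 fold
def pvDigitsInt (cs : List Char) : Int := cs.foldl (fun a c => a * 10 + ((c.toNat : Int) - 48)) 0

-- inner while loop of A: (s_int so far, current suffix starting at i) → (s_int, suffix at exit)
def pvInnerA (sInt : List Char) : List Char → List Char × List Char
  | [] => (sInt, [])
  | a :: rest => if pvIsDig a then pvInnerA (sInt ++ [a]) rest else (sInt, a :: rest)

theorem pvInnerA_snd_length (sInt : List Char) (cs : List Char) :
    (pvInnerA sInt cs).2.length ≤ cs.length := by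
  induction cs generalizing sInt with
  | nil => simp [pvInnerA]
  | cons a rest ih =>
    simp only [pvInnerA]
    split
    · exact Nat.le_trans (ih _) (Nat.le_succ _)
    · exact Nat.le_refl _

-- outer while loop of A: state (numbers, suffix of s starting at i)
def pvOuterA (numbers : List Int) : List Char → List Int
  | [] => numbers
  | c :: rest =>
    let p := pvInnerA [] (c :: rest)       -- s_int = '', a = s[i], inner while
    let rest2 := p.2.drop 1                -- i += 1
    let numbers2 := if p.1 ≠ [] then numbers ++ [pvDigitsInt p.1] else numbers
    pvOuterA numbers2 rest2
termination_by cs => cs.length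
decreasing_by
  have h := pvInnerA_snd_length [] (c :: rest)
  simp only [List.length_drop]
  simp only [List.length_cons] at h ⊢
  omega

def selection_coefficients (string : String) : List Int :=
  let numbers := pvOuterA [] string.toList
  let coefficient := (PySem.List.pyRange 0 ((numbers.length : Int) - 2) 1).foldl
      (fun acc i => if PySem.Int.mod i 2 == 0 then acc ++ [PySem.List.pyGetD numbers i 0] else acc) []
  match PySem.List.pyGet? numbers (-2) with
  | some v => coefficient ++ [v]
  | none => []   -- numbers[-2] raises IndexError here; excluded by Pre_

-- ===== PORT B =====
-- the per-token Horner fold of B: v = 10 * v + ord(c) - 48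
def pvHorner (w : List Char) : Int := w.foldl (fun v c => 10 * v + ((c.toNat : Int) - 48)) 0

def selection_coefficients_alt (string : String) : List Int :=
  let blanked := string.toList.map (fun c => if pvIsDig c then c else ' ')
  let numbers := (PySem.Chars.split₀ blanked).foldl (fun nums w => nums ++ [pvHorner w]) []
  match PySem.List.pyGet? numbers (-2) with
  | some v => (PySem.List.slice? numbers none (some (-2)) 2).getD [] ++ [v]
  | none => []   -- numbers[-2] raises IndexError here; excluded by Pre_

-- ===== PRECONDITION & SPEC =====
-- Pre_ excludes strings with fewer than two maximal digit runs, on which A (and B) raise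
-- IndexError at numbers[-2]; a digit run starts at a digit whose predecessor is not a digit.
def Pre_selection_coefficients (string : String) : Prop :=
  2 ≤ ((' ' :: string.toList).zip string.toList).countP (fun p => !(pvIsDig p.1) && pvIsDig p.2)
instance (string : String) : Decidable (Pre_selection_coefficients string) := by
  unfold Pre_selection_coefficients; infer_instance

def pvWitness_selection_coefficients : String := "12 and 34"

def Spec_selection_coefficients (string : String) (out : List Int) : Prop := out = selection_coefficients_alt string
instance (string : String) (out : List Int) : Decidable (Spec_selection_coefficients string out) := by unfold Spec_selection_coefficients; infer_instance

-- ===== CLAIM (what is proved, stated in full; the proofs are below) =====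
def Claim_equal_selection_coefficients : Prop := ∀ (string : String), Dom_selection_coefficients string → Pre_selection_coefficients string → Spec_selection_coefficients string (selection_coefficients string)

-- ===== LEMMAS AND PROOFS =====

-- the maximal digit runs of cs, as character lists
def pvRunsC : List Char → List (List Char)
  | [] => []
  | c :: cs =>
    if pvIsDig c then (c :: cs.takeWhile pvIsDig) :: pvRunsC (cs.dropWhile pvIsDig)
    else pvRunsC cs
termination_by cs => cs.length
decreasing_by
  · have := List.length_dropWhile_le pvIsDig cs
    simp only [List.length_cons]; omega
  · simp

-- canonical value list of the maximal digit runs of cs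
def pvRuns : List Char → List Int
  | [] => []
  | c :: cs =>
    if pvIsDig c then pvDigitsInt (c :: cs.takeWhile pvIsDig) :: pvRuns (cs.dropWhile pvIsDig)
    else pvRuns cs
termination_by cs => cs.length
decreasing_by
  · have := List.length_dropWhile_le pvIsDig cs
    simp only [List.length_cons]; omega
  · simp

theorem pvRuns_eq_map (cs : List Char) : pvRuns cs = (pvRunsC cs).map pvDigitsInt := by
  fun_induction pvRunsC cs with
  | case1 => simp [pvRuns]
  | case2 c cs h ih => simp [pvRuns, h, ih]
  | case3 c cs h ih => simp [pvRuns, h, ih]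

theorem pvInnerA_eq (cs : List Char) (sInt : List Char) :
    pvInnerA sInt cs = (sInt ++ cs.takeWhile pvIsDig, cs.dropWhile pvIsDig) := by
  induction cs generalizing sInt with
  | nil => simp [pvInnerA]
  | cons a rest ih =>
    simp only [pvInnerA, List.takeWhile, List.dropWhile]
    by_cases h : pvIsDig a
    · simp [h, ih]
    · simp [h]

theorem pvRuns_drop_head_nondigit (cs : List Char) (h : ∀ d ∈ cs.head?, pvIsDig d = false) :
    pvRuns cs = pvRuns (cs.drop 1) := by
  cases cs with
  | nil => rfl
  | cons d t =>
    have hd : pvIsDig d = false := h d rfl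
    simp [pvRuns, hd]

theorem pvOuterA_eq (cs : List Char) (numbers : List Int) :
    pvOuterA numbers cs = numbers ++ pvRuns cs := by
  fun_induction pvOuterA numbers cs with
  | case1 numbers => simp [pvRuns]
  | case2 numbers c rest p rest2 numbers2 ih =>
    rw [ih]
    by_cases h : pvIsDig c
    · have hp : p = (c :: rest.takeWhile pvIsDig, rest.dropWhile pvIsDig) := by
        simp only [p, pvInnerA_eq, List.takeWhile, List.dropWhile, h]; simp
      have hne : p.1 ≠ [] := by simp [hp]
      have h2 : pvRuns rest2 = pvRuns (rest.dropWhile pvIsDig) := by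
        have : rest2 = (rest.dropWhile pvIsDig).drop 1 := by simp [rest2, hp]
        rw [this, ← pvRuns_drop_head_nondigit]
        intro d hd
        have hh := List.head?_dropWhile_not pvIsDig rest
        cases h' : (rest.dropWhile pvIsDig).head? <;> simp [h'] at hd hh; simp_all
      simp only [numbers2, h2, hp]
      simp [pvRuns, h, List.append_assoc]
    · have hp : p = ([], c :: rest) := by
        simp only [p, pvInnerA_eq, List.takeWhile, List.dropWhile, h]; simp
      have : rest2 = rest := by simp [rest2, hp]
      simp only [numbers2, hp, this]
      simp [pvRuns, h]

-- a digit character is not Python whitespace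
theorem pvIsDig_not_isspace (c : Char) (h : pvIsDig c = true) : PySem.Chars.isspace c = false := by
  have hb : 48 ≤ c.toNat ∧ c.toNat ≤ 57 := by
    simp only [pvIsDig, Bool.and_eq_true, decide_eq_true_eq] at h
    exact ⟨h.1, h.2⟩
  simp only [PySem.Chars.isspace, Bool.or_eq_false_iff, Bool.and_eq_false_iff,
    decide_eq_false_iff_not]
  omega

-- the split₀ worker on a blanked string peels off exactly the digit runs
theorem pvGo (cs : List Char) (cur : List Char) (acc : List (List Char)) :
    PySem.Chars.split₀.go (cs.map (fun c => if pvIsDig c then c else ' ')) cur acc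
    = acc.reverse ++ (if cur.isEmpty then pvRunsC cs
        else (cur.reverse ++ cs.takeWhile pvIsDig) :: pvRunsC (cs.dropWhile pvIsDig)) := by
  induction cs generalizing cur acc with
  | nil =>
    rw [List.map_nil, PySem.Chars.split₀.go]
    by_cases h : cur.isEmpty <;> simp [h, pvRunsC]
  | cons c rest ih =>
    rw [List.map_cons]
    by_cases h : pvIsDig c
    · rw [if_pos h, PySem.Chars.split₀.go]
      rw [pvIsDig_not_isspace c h]
      simp only [Bool.false_eq_true, if_false]
      rw [ih]
      by_cases hc : cur.isEmpty
      · have hcur : cur = [] := by simpa [List.isEmpty_iff] using hc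
        simp [hcur, pvRunsC, h]
      · simp [hc, h]
    · rw [if_neg h, PySem.Chars.split₀.go]
      have hsp : PySem.Chars.isspace ' ' = true := by decide
      rw [hsp, if_pos rfl]
      by_cases hc : cur.isEmpty
      · rw [if_pos hc, ih]
        have : pvRunsC (c :: rest) = pvRunsC rest := by simp [pvRunsC, h]
        simp [hc, this]
      · rw [if_neg hc, ih]
        have h1 : pvRunsC (c :: rest) = pvRunsC rest := by simp [pvRunsC, h]
        have h2 : (c :: rest).takeWhile pvIsDig = [] := by simp [List.takeWhile, h]
        have h3 : (c :: rest).dropWhile pvIsDig = c :: rest := by simp [List.dropWhile, h]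
        simp [hc, h1, h2, h3]

theorem pvHorner_eq (w : List Char) : pvHorner w = pvDigitsInt w := by
  unfold pvHorner pvDigitsInt
  congr 1
  funext v c
  ring

theorem pvNumbers_eq (cs : List Char) :
    (PySem.Chars.split₀ (cs.map (fun c => if pvIsDig c then c else ' '))).foldl
      (fun nums w => nums ++ [pvHorner w]) []
    = pvOuterA [] cs := by
  rw [pvOuterA_eq, PySem.List.foldl_append_singleton_eq_map]
  show _ ++ _ = _
  rw [PySem.Chars.split₀, pvGo]
  simp [pvRuns_eq_map, pvHorner_eq]

-- even indices of range M
theorem pvRangeFilterEven (M : Nat) :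
    (List.range M).filter (fun k => k % 2 == 0) = (List.range ((M + 1) / 2)).map (fun j => 2 * j) := by
  induction M with
  | zero => rfl
  | succ M ih =>
    rw [List.range_succ, List.filter_append, ih]
    by_cases h : M % 2 = 0
    · have h2 : (M + 1 + 1) / 2 = (M + 1) / 2 + 1 := by omega
      have h3 : 2 * ((M + 1) / 2) = M := by omega
      simp [h, h2, List.range_succ, h3]
    · have h2 : (M + 1 + 1) / 2 = (M + 1) / 2 := by omega
      simp [h, h2]

-- A's even-index loop over range(len-2) equals the slice numbers[:-2:2]
theorem pvTail_eq (m : List Int) :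
    (PySem.List.pyRange 0 ((m.length : Int) - 2) 1).foldl
      (fun acc i => if PySem.Int.mod i 2 == 0 then acc ++ [PySem.List.pyGetD m i 0] else acc) []
    = (PySem.List.slice? m none (some (-2)) 2).getD [] := by
  have hidx : PySem.List.sliceIndices m.length none (some (-2)) 2
      = (0, max ((m.length : Int) - 2) 0, 2) := by
    unfold PySem.List.sliceIndices
    simp
    omega
  rw [PySem.List.foldl_append_if (p := fun i => PySem.Int.mod i 2 == 0)
      (f := fun i => PySem.List.pyGetD m i 0)]
  unfold PySem.List.slice?
  rw [hidx]
  simp only [List.nil_append]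
  set n := m.length with hn
  by_cases h2 : 2 ≤ n
  · have hM : ((n : Int) - 2) = ((n - 2 : Nat) : Int) := by omega
    rw [hM]
    set M := n - 2 with hMdef
    have hmax : max ((M : Int)) 0 = (M : Int) := by omega
    rw [hmax]
    have hcount : (if 0 < (2:Int) then if 0 < (M:Int) then (((M:Int) - 0 + 2 - 1) / 2).toNat else 0
        else if (M:Int) < 0 then ((0 - (M:Int) + -2 - 1) / -2).toNat else 0) = (M + 1) / 2 := by
      split
      · split <;> omega
      · omega
    rw [if_neg (by norm_num), hcount]
    rw [PySem.List.pyRange_zero_natCast, List.filter_map, Option.getD_some]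
    have hfc : List.filter ((fun i => PySem.Int.mod i 2 == 0) ∘ fun k => ((k : Nat) : Int)) (List.range M)
        = List.filter (fun k => k % 2 == 0) (List.range M) := by
      apply List.filter_congr
      intro k _
      simp [Function.comp]
      omega
    rw [hfc, pvRangeFilterEven, List.map_map]
    have : ∀ k ∈ List.range ((M+1)/2), (fun k => m[((0:Int) + 2 * (k:Int)).toNat]?) k
        = (some ∘ fun k => m.getD (2 * k) 0) k := by
      intro k hk
      simp only [List.mem_range] at hk
      have h1 : ((0:Int) + 2 * (k:Int)).toNat = 2 * k := by omega
      simp only [Function.comp_apply, h1]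
      rw [List.getElem?_eq_getElem (by omega : 2 * k < m.length), List.getD_eq_getElem m 0 (by omega)]
    rw [List.filterMap_congr this, List.filterMap_eq_map, List.map_map]
    apply List.map_congr_left
    intro j _
    simp only [Function.comp_apply, PySem.List.pyGetD_natCast]
  · have hmax : max ((n:Int) - 2) 0 = 0 := by omega
    rw [hmax]
    have hr : PySem.List.pyRange 0 ((n : Int) - 2) 1 = [] := by
      unfold PySem.List.pyRange
      simp
      omega
    simp [hr]

theorem pvFinal (s : String) : selection_coefficients s = selection_coefficients_alt s := by
  unfold selection_coefficients selection_coefficients_alt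
  rw [← pvNumbers_eq]
  simp only [pvTail_eq]

-- ===== VERDICT (by name: the statement is the Claim_ definition above) =====
theorem selection_coefficients_spec : Claim_equal_selection_coefficients := by
  intro s _ _
  unfold Spec_selection_coefficients
  exact pvFinal s
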